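-- pv_equiv track=rewrite | github.com/vk-playground/mcp-context-forge | mcp-servers/python/mcp_eval_server/mcp_eval_server/tools/privacy_tools.py | _check_required_consent_elements
-- ===== SOURCE A (Python) =====
-- from typing import Any, Dict, List, Optional
--
-- def _check_required_consent_elements(consent_text: str) -> Dict[str, bool]:
--     """Check for required consent elements.
--
--     Args:
--         consent_text: Consent text to check
--
--     Returns:
--         Mapping of required elements to presence status
--     """
--     elements = {
--         "purpose_statement": "purpose" in consent_text.lower(),
--         "data_types": any(word in consent_text.lower() for word in ["data", "information", "personal"]),
--         "retention_period": any(word in consent_text.lower() for word in ["retain", "keep", "store", "delete"]),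
--         "user_rights": any(word in consent_text.lower() for word in ["right", "access", "delete", "opt-out"]),
--         "contact_info": "@" in consent_text or "contact" in consent_text.lower(),
--     }
--
--     return elements
-- ===== SOURCE B (Python) =====
-- _CONSENT_TABLE = [
--     ("purpose_statement", ["purpose"]),
--     ("data_types", ["data", "information", "personal"]),
--     ("retention_period", ["retain", "keep", "store", "delete"]),
--     ("user_rights", ["right", "access", "delete", "opt-out"]),
--     ("contact_info", ["@", "contact"]),
-- ]
--
-- _KEYWORDS = [w for _, ws in _CONSENT_TABLE for w in ws]
--
--
-- def _check_required_consent_elements(consent_text: str):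
--     # Single left-to-right scan: at each position collect every trigger keyword
--     # that starts there, then read the answers off the accumulated set.
--     lowered = consent_text.lower()
--     found = set()
--     for i in range(len(lowered)):
--         for w in _KEYWORDS:
--             if w not in found and lowered.startswith(w, i):
--                 found.add(w)
--     return {name: any(w in found for w in ws) for name, ws in _CONSENT_TABLE}
-- ===== Notes on version B (the rewrite author's own statement) =====
-- stated objective: alternative
-- what changed: Instead of A's fourteen independent substring-membership tests (each a separate scan of the text), B makes ONE left-to-right pass over the lowered text, accumulating in a set every trigger keyword that starts at the current position, and then builds the result dict by set lookups from a name->keywords table; checking '@' against the lowered text is exact since lowering fixes '@'.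
import Mathlib
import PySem

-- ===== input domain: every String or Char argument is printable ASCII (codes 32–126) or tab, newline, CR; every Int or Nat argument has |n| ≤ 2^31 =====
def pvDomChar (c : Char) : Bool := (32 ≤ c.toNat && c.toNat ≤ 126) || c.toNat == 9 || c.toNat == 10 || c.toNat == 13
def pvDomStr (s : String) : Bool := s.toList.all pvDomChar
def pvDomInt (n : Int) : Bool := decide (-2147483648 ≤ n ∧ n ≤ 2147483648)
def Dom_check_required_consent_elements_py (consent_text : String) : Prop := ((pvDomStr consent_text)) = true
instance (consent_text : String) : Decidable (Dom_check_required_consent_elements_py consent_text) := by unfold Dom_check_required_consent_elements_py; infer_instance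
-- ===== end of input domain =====

-- B replaces A's per-keyword independent substring tests by ONE left-to-right scan of the lowered
-- text that accumulates a set of the trigger keywords starting at each position, then reads the
-- answers off that set via a name→keywords table (objective: alternative; '@' is fixed by
-- lowering, so testing it on the lowered text is exact).

-- ===== PORT A =====
def check_required_consent_elements_py (consent_text : String) : List (String × Bool) :=
  (((((PySem.Dict.empty.insert "purpose_statement"
        (PySem.Str.isIn "purpose" (PySem.Str.lower consent_text))).insert
      "data_types"
        (["data", "information", "personal"].any
          (fun word => PySem.Str.isIn word (PySem.Str.lower consent_text)))).insert
      "retention_period"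
        (["retain", "keep", "store", "delete"].any
          (fun word => PySem.Str.isIn word (PySem.Str.lower consent_text)))).insert
      "user_rights"
        (["right", "access", "delete", "opt-out"].any
          (fun word => PySem.Str.isIn word (PySem.Str.lower consent_text)))).insert
      "contact_info"
        (PySem.Str.isIn "@" consent_text
          || PySem.Str.isIn "contact" (PySem.Str.lower consent_text))).items

-- ===== PORT B =====
def pvConsentTable : List (String × List String) :=
  [("purpose_statement", ["purpose"]),
   ("data_types", ["data", "information", "personal"]),
   ("retention_period", ["retain", "keep", "store", "delete"]),
   ("user_rights", ["right", "access", "delete", "opt-out"]),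
   ("contact_info", ["@", "contact"])]

-- [w for _, ws in _CONSENT_TABLE for w in ws]  (held as List Char, the char-level form the scan works on)
def pvKeywords : List (List Char) :=
  pvConsentTable.flatMap (fun p => p.2.map String.toList)

-- the 'for i in range(len(lowered))' loop: recursion over the suffixes of the text; at each
-- position, 'lowered.startswith(w, i)' is 'w.isPrefixOf (current suffix)' (exact: both compare
-- w against the characters from position i on)
def pvScan (kws : List (List Char)) (l : List Char) (found : PySem.Set (List Char)) :
    PySem.Set (List Char) :=
  match l with
  | [] => found
  | c :: rest =>
      pvScan kws rest
        (kws.foldl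
          (fun f w =>
            if !(PySem.Set.contains f w) && w.isPrefixOf (c :: rest) then PySem.Set.add f w else f)
          found)

def check_required_consent_elements_py_alt (consent_text : String) : List (String × Bool) :=
  let lowered := (PySem.Str.lower consent_text).toList
  let found := pvScan pvKeywords lowered PySem.Set.empty
  pvConsentTable.map
    (fun p => (p.1, p.2.any (fun w => PySem.Set.contains found w.toList)))

-- ===== PRECONDITION & SPEC =====
def Spec_check_required_consent_elements_py (consent_text : String) (out : List (String × Bool)) : Prop := out = check_required_consent_elements_py_alt consent_text
instance (consent_text : String) (out : List (String × Bool)) : Decidable (Spec_check_required_consent_elements_py consent_text out) := by unfold Spec_check_required_consent_elements_py; infer_instance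

-- ===== CLAIM (what is proved, stated in full; the proofs are below) =====
def Claim_equal_check_required_consent_elements_py : Prop := ∀ (consent_text : String), Dom_check_required_consent_elements_py consent_text → Spec_check_required_consent_elements_py consent_text (check_required_consent_elements_py consent_text)

-- ===== LEMMAS AND PROOFS =====

-- one position of the scan: the inner keyword loop
theorem pv_foldl_step (l : List Char) (w : List Char) :
    ∀ (kws : List (List Char)) (f : PySem.Set (List Char)),
      PySem.Set.contains
        (kws.foldl
          (fun f w =>
            if !(PySem.Set.contains f w) && w.isPrefixOf l then PySem.Set.add f w else f) f) w
        = (PySem.Set.contains f w || (kws.contains w && w.isPrefixOf l)) := by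
  intro kws
  induction kws with
  | nil => simp
  | cons v kws ih =>
      intro f
      simp only [List.foldl_cons, ih, List.contains_cons]
      have hstep :
          PySem.Set.contains
            (if !(PySem.Set.contains f v) && v.isPrefixOf l then PySem.Set.add f v else f) w
            = (PySem.Set.contains f w || ((w == v) && w.isPrefixOf l)) := by
        by_cases hv : w = v
        · subst hv
          split_ifs with h
          · simp only [Bool.and_eq_true, Bool.not_eq_eq_eq_not, Bool.not_true] at h
            simp [h.2]
          · cases hc : PySem.Set.contains f w <;> cases hp : w.isPrefixOf l <;>
              simp_all
        · have : (w == v) = false := by simp [hv]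
          split_ifs with h <;> simp [this, hv]
      rw [hstep]
      cases PySem.Set.contains f w <;> cases hw : (w == v) <;>
        cases w.isPrefixOf l <;> cases kws.contains w <;> simp

-- 'sub in s' splits at the head of s
theorem pv_isIn_cons (w : List Char) :
    ∀ (l : List Char), l ≠ [] →
      PySem.Chars.isIn w l = (w.isPrefixOf l || PySem.Chars.isIn w l.tail) := by
  intro l hl
  match l, hl with
  | c :: rest, _ =>
      rw [Bool.eq_iff_iff]
      simp only [Bool.or_eq_true, PySem.Chars.isIn_iff_infix, List.tail_cons,
        List.infix_cons_iff, List.isPrefixOf_iff_prefix]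

-- the scan finds exactly the nonempty keywords occurring in the text
theorem pv_scan_contains (kws : List (List Char)) (w : List Char) (hw : w ≠ []) :
    ∀ (l : List Char) (f : PySem.Set (List Char)),
      PySem.Set.contains (pvScan kws l f) w
        = (PySem.Set.contains f w || (kws.contains w && PySem.Chars.isIn w l)) := by
  intro l
  induction l with
  | nil =>
      intro f
      have : PySem.Chars.isIn w [] = false := by
        rw [PySem.Chars.isIn_eq_false_iff]
        simp [List.infix_nil, hw]
      simp [pvScan, this]
  | cons c rest ih =>
      intro f
      simp only [pvScan, ih, pv_foldl_step (c :: rest) w]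
      rw [pv_isIn_cons w (c :: rest) (by simp)]
      simp only [List.tail_cons]
      cases PySem.Set.contains f w <;> cases kws.contains w <;>
        cases List.isPrefixOf w (c :: rest) <;> cases PySem.Chars.isIn w rest <;> simp

-- lowering a char yields '@' only if the char was '@'
theorem pv_lowerChar_eq_at (c : Char) : PySem.Chars.lowerChar c = '@' ↔ c = '@' := by
  simp only [PySem.Chars.lowerChar, PySem.Chars.isupper]
  split_ifs with h
  · simp only [Bool.and_eq_true, decide_eq_true_eq, Char.le_def] at h
    have hlo : 65 ≤ c.toNat ∧ c.toNat ≤ 90 := by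
      have h1 := UInt32.le_iff_toNat_le.mp h.1
      have h2 := UInt32.le_iff_toNat_le.mp h.2
      have : ('A' : Char).val.toNat = 65 := rfl
      have : ('Z' : Char).val.toNat = 90 := rfl
      unfold Char.toNat
      omega
    constructor
    · intro he
      have hc := congrArg Char.toNat he
      rw [Char.toNat_ofNat, if_pos (Or.inl (by omega))] at hc
      have : ('@' : Char).toNat = 64 := rfl
      omega
    · intro he
      subst he
      revert hlo
      decide
  · simp

-- a one-element pattern is an infix iff its element is a member
theorem pv_singleton_infix {α : Type} (a : α) (l : List α) : [a] <:+: l ↔ a ∈ l := by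
  constructor
  · intro h
    exact h.subset (by simp)
  · intro h
    obtain ⟨s, t, rfl⟩ := List.append_of_mem h
    exact ⟨s, t, by simp⟩

-- '@' occurs in the text iff it occurs in the lowered text ('@' is fixed by lowering)
theorem pv_at_in_lower (l : List Char) :
    PySem.Chars.isIn ['@'] l = PySem.Chars.isIn ['@'] (PySem.Chars.lower l) := by
  rw [Bool.eq_iff_iff, PySem.Chars.isIn_iff_infix, PySem.Chars.isIn_iff_infix,
      pv_singleton_infix, pv_singleton_infix]
  have hmap : PySem.Chars.lower l = l.map PySem.Chars.lowerChar := by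
    simp [PySem.Chars.lower]
  rw [hmap, List.mem_map]
  constructor
  · intro h
    exact ⟨'@', h, by decide⟩
  · rintro ⟨c, hc, he⟩
    rwa [(pv_lowerChar_eq_at c).mp he] at hc

-- ===== VERDICT (by name: the statement is the Claim_ definition above) =====
theorem check_required_consent_elements_py_spec : Claim_equal_check_required_consent_elements_py := by
  intro s _
  unfold Spec_check_required_consent_elements_py
  unfold check_required_consent_elements_py check_required_consent_elements_py_alt
  simp only [pvConsentTable, pvKeywords, List.flatMap_cons, List.map_cons, List.map_nil,
    List.flatMap_nil, List.append_nil, List.cons_append, List.nil_append]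
  have key : ∀ w : List Char, w ≠ [] →
      ([['p', 'u', 'r', 'p', 'o', 's', 'e'],
       ['d', 'a', 't', 'a'],
       ['i', 'n', 'f', 'o', 'r', 'm', 'a', 't', 'i', 'o', 'n'],
       ['p', 'e', 'r', 's', 'o', 'n', 'a', 'l'],
       ['r', 'e', 't', 'a', 'i', 'n'],
       ['k', 'e', 'e', 'p'],
       ['s', 't', 'o', 'r', 'e'],
       ['d', 'e', 'l', 'e', 't', 'e'],
       ['r', 'i', 'g', 'h', 't'],
       ['a', 'c', 'c', 'e', 's', 's'],
       ['d', 'e', 'l', 'e', 't', 'e'],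
       ['o', 'p', 't', '-', 'o', 'u', 't'],
       ['@'],
       ['c', 'o', 'n', 't', 'a', 'c', 't']].contains w = true) →
      decide (w ∈ pvScan
        [['p', 'u', 'r', 'p', 'o', 's', 'e'],
       ['d', 'a', 't', 'a'],
       ['i', 'n', 'f', 'o', 'r', 'm', 'a', 't', 'i', 'o', 'n'],
       ['p', 'e', 'r', 's', 'o', 'n', 'a', 'l'],
       ['r', 'e', 't', 'a', 'i', 'n'],
       ['k', 'e', 'e', 'p'],
       ['s', 't', 'o', 'r', 'e'],
       ['d', 'e', 'l', 'e', 't', 'e'],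
       ['r', 'i', 'g', 'h', 't'],
       ['a', 'c', 'c', 'e', 's', 's'],
       ['d', 'e', 'l', 'e', 't', 'e'],
       ['o', 'p', 't', '-', 'o', 'u', 't'],
       ['@'],
       ['c', 'o', 'n', 't', 'a', 'c', 't']]
        (PySem.Chars.lower s.toList) ([] : PySem.Set (List Char)))
        = PySem.Chars.isIn w (PySem.Chars.lower s.toList) := by
    intro w hw hmem
    have h := pv_scan_contains
      [['p', 'u', 'r', 'p', 'o', 's', 'e'],
       ['d', 'a', 't', 'a'],
       ['i', 'n', 'f', 'o', 'r', 'm', 'a', 't', 'i', 'o', 'n'],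
       ['p', 'e', 'r', 's', 'o', 'n', 'a', 'l'],
       ['r', 'e', 't', 'a', 'i', 'n'],
       ['k', 'e', 'e', 'p'],
       ['s', 't', 'o', 'r', 'e'],
       ['d', 'e', 'l', 'e', 't', 'e'],
       ['r', 'i', 'g', 'h', 't'],
       ['a', 'c', 'c', 'e', 's', 's'],
       ['d', 'e', 'l', 'e', 't', 'e'],
       ['o', 'p', 't', '-', 'o', 'u', 't'],
       ['@'],
       ['c', 'o', 'n', 't', 'a', 'c', 't']] w hw (PySem.Str.lower s).toList PySem.Set.empty
    rw [hmem] at h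
    simpa [PySem.Set.empty, PySem.Set.contains, List.contains_eq_mem] using h
  have k01 := key ['p', 'u', 'r', 'p', 'o', 's', 'e'] (by decide) (by decide)
  have k02 := key ['d', 'a', 't', 'a'] (by decide) (by decide)
  have k03 := key ['i', 'n', 'f', 'o', 'r', 'm', 'a', 't', 'i', 'o', 'n'] (by decide) (by decide)
  have k04 := key ['p', 'e', 'r', 's', 'o', 'n', 'a', 'l'] (by decide) (by decide)
  have k05 := key ['r', 'e', 't', 'a', 'i', 'n'] (by decide) (by decide)
  have k06 := key ['k', 'e', 'e', 'p'] (by decide) (by decide)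
  have k07 := key ['s', 't', 'o', 'r', 'e'] (by decide) (by decide)
  have k08 := key ['d', 'e', 'l', 'e', 't', 'e'] (by decide) (by decide)
  have k09 := key ['r', 'i', 'g', 'h', 't'] (by decide) (by decide)
  have k10 := key ['a', 'c', 'c', 'e', 's', 's'] (by decide) (by decide)
  have k11 := key ['o', 'p', 't', '-', 'o', 'u', 't'] (by decide) (by decide)
  have k12 := key ['@'] (by decide) (by decide)
  have k13 := key ['c', 'o', 'n', 't', 'a', 'c', 't'] (by decide) (by decide)
  simp [PySem.Dict.insert, PySem.Dict.empty, PySem.Dict.contains, List.any,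
    PySem.Str.isIn, pv_at_in_lower s.toList]
  simp only [k01, k02, k03, k04, k05, k06, k07, k08, k09, k10, k11, k12, k13]
  simp
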